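-- pv_equiv track=rewrite | github.com/deadex-ng/sentana | simpleSA.py | get_polarity
-- ===== SOURCE A (Python) =====
-- negative = ['sizabwino', 'sibho','nditrash']
--
-- positive = ['zabwino','yabho','mwalamwala']
--
-- stopwords =['ndi','iyi','nde']
--
-- def get_polarity(text):
--
--     #counter for postive polarity
--     counter_pos = 0
--
--     #counter for negative polarity
--     counter_neg = 0
--
--     #split text to list
--     txt_list = text.split()
--
--     #remove stopwords for text
--     for word in list(txt_list):
--         if word in stopwords:
--             txt_list.remove(word)
--
--     #count number of positive or negative word in text
--     for word in txt_list:
--         if word in positive: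
--             counter_pos = counter_pos + 1
--         if word in negative:
--             counter_neg = counter_neg + 1
--
--     if counter_pos > counter_neg:
--         return 'Positive'
--     elif counter_pos < counter_neg:
--         return 'Negative'
--     else:
--         return 'Neutral'
-- ===== SOURCE B (Python) =====
-- negative = ['sizabwino', 'sibho','nditrash']
--
-- positive = ['zabwino','yabho','mwalamwala']
--
-- stopwords =['ndi','iyi','nde']
--
-- def get_polarity(text):
--     # one pass to build a word-frequency table, then sum the table over the
--     # fixed sentiment vocabularies (stopwords are disjoint from both, so no
--     # stopword-removal pass is needed)
--     counts = {}
--     for word in text.split():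
--         counts[word] = counts.get(word, 0) + 1
--     counter_pos = sum(counts.get(w, 0) for w in positive)
--     counter_neg = sum(counts.get(w, 0) for w in negative)
--     if counter_pos > counter_neg:
--         return 'Positive'
--     elif counter_pos < counter_neg:
--         return 'Negative'
--     else:
--         return 'Neutral'
-- ===== Notes on version B (the rewrite author's own statement) =====
-- stated objective: alternative
-- what changed: B inverts the traversal: it builds a word-frequency table of the split text in one pass and sums the table over the fixed positive/negative vocabularies, dropping A's stopword-removal pass entirely (stopwords are disjoint from both sentiment lists, so that pass never affects the counters).
import Mathlib
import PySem

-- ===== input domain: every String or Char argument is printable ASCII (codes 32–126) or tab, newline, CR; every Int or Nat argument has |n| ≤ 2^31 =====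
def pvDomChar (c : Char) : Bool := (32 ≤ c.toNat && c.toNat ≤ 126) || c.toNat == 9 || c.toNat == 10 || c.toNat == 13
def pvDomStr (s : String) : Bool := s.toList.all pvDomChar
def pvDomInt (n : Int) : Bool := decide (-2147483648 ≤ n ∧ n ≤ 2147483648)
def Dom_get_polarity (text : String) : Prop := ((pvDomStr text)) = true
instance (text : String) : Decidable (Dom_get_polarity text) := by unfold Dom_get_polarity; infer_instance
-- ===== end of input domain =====

-- B builds a word-frequency table in one pass and sums it over the fixed sentiment
-- vocabularies, dropping A's stopword-removal pass (stopwords are disjoint from both lists).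

-- ===== PORT A =====
def pvNegative : List String := ["sizabwino", "sibho", "nditrash"]
def pvPositive : List String := ["zabwino", "yabho", "mwalamwala"]
def pvStopwords : List String := ["ndi", "iyi", "nde"]

-- 'for word in list(txt_list): if word in stopwords: txt_list.remove(word)'
-- (list.remove raises ValueError only when the value is absent; here the word was
--  drawn from a copy of the very list, so the 'none' branch is unreachable)
def pvRemLoop (copy l : List String) : List String :=
  copy.foldl (fun acc word =>
    if word ∈ pvStopwords then
      match PySem.List.remove? acc word with
      | some acc' => acc'
      | none => acc
    else acc) l

def get_polarity (text : String) : String :=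
  let txt0 := PySem.Str.split₀ text
  let txt := pvRemLoop txt0 txt0
  let c := txt.foldl (fun (c : Int × Int) word =>
      ((if word ∈ pvPositive then c.1 + 1 else c.1),
       (if word ∈ pvNegative then c.2 + 1 else c.2))) (0, 0)
  if c.1 > c.2 then "Positive"
  else if c.1 < c.2 then "Negative"
  else "Neutral"

-- ===== PORT B =====
def get_polarity_alt (text : String) : String :=
  let counts : PySem.Dict String Int :=
    (PySem.Str.split₀ text).foldl (fun d x => d.insert x (d.getD x 0 + 1)) PySem.Dict.empty
  let counter_pos : Int := pvPositive.foldl (fun s w => s + counts.getD w 0) 0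
  let counter_neg : Int := pvNegative.foldl (fun s w => s + counts.getD w 0) 0
  if counter_pos > counter_neg then "Positive"
  else if counter_pos < counter_neg then "Negative"
  else "Neutral"

-- ===== PRECONDITION & SPEC =====
def Spec_get_polarity (text : String) (out : String) : Prop := out = get_polarity_alt text
instance (text : String) (out : String) : Decidable (Spec_get_polarity text out) := by unfold Spec_get_polarity; infer_instance

-- ===== CLAIM (what is proved, stated in full; the proofs are below) =====
def Claim_equal_get_polarity : Prop := ∀ (text : String), Dom_get_polarity text → Spec_get_polarity text (get_polarity text)

-- ===== LEMMAS AND PROOFS =====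

-- removing one occurrence of v leaves the count of any w ≠ v unchanged
theorem pv_count_remove? (l : List String) (l' : List String) (v w : String)
    (hne : w ≠ v) (h : PySem.List.remove? l v = some l') : l'.count w = l.count w := by
  induction l generalizing l' with
  | nil => simp [PySem.List.remove?] at h
  | cons x xs ih =>
    by_cases hx : x = v
    · subst hx
      rw [PySem.List.remove?_cons_self] at h
      cases h
      simp [Ne.symm hne]
    · rw [PySem.List.remove?_cons_of_ne xs hx] at h
      cases hr : PySem.List.remove? xs v with
      | none => rw [hr] at h; simp at h
      | some xs' =>
        rw [hr] at h
        simp at h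
        subst h
        simp [List.count_cons, ih xs' hr]

-- the stopword-removal loop preserves the count of every non-stopword
theorem pv_count_remLoop (copy : List String) (l : List String) (w : String)
    (hw : w ∉ pvStopwords) : (pvRemLoop copy l).count w = l.count w := by
  induction copy generalizing l with
  | nil => simp [pvRemLoop]
  | cons x xs ih =>
    simp only [pvRemLoop, List.foldl_cons] at *
    by_cases hx : x ∈ pvStopwords
    · simp only [hx, if_pos]
      cases hr : PySem.List.remove? l x with
      | none => simpa [hr] using ih l
      | some l' =>
        have hne : w ≠ x := fun h => hw (h ▸ hx)
        rw [ih l', pv_count_remove? l l' x w hne hr]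
    · simpa [hx] using ih l

-- a membership test against the three-word positive list, as a 0/1 sum of equalities
theorem pv_pos_indicator (x : String) :
    (if x ∈ pvPositive then (1 : Int) else 0) =
    (if x = "zabwino" then 1 else 0) + (if x = "yabho" then 1 else 0) +
    (if x = "mwalamwala" then 1 else 0) := by
  by_cases h1 : x = "zabwino" <;> by_cases h2 : x = "yabho" <;>
    by_cases h3 : x = "mwalamwala" <;> simp_all [pvPositive]

theorem pv_neg_indicator (x : String) :
    (if x ∈ pvNegative then (1 : Int) else 0) =
    (if x = "sizabwino" then 1 else 0) + (if x = "sibho" then 1 else 0) +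
    (if x = "nditrash" then 1 else 0) := by
  by_cases h1 : x = "sizabwino" <;> by_cases h2 : x = "sibho" <;>
    by_cases h3 : x = "nditrash" <;> simp_all [pvNegative]

-- A's single counting loop computes the two vocabulary-count sums
theorem pv_pairfold (l : List String) (a b : Int) :
    l.foldl (fun (c : Int × Int) word =>
      ((if word ∈ pvPositive then c.1 + 1 else c.1),
       (if word ∈ pvNegative then c.2 + 1 else c.2))) (a, b) =
    (a + l.count "zabwino" + l.count "yabho" + l.count "mwalamwala",
     b + l.count "sizabwino" + l.count "sibho" + l.count "nditrash") := by
  induction l generalizing a b with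
  | nil => simp
  | cons x xs ih =>
    rw [List.foldl_cons, ih]
    have hp := pv_pos_indicator x
    have hn := pv_neg_indicator x
    rw [Prod.mk.injEq]
    constructor <;> simp only [List.count_cons, beq_iff_eq] <;>
      by_cases h1 : x = "zabwino" <;> by_cases h2 : x = "yabho" <;>
      by_cases h3 : x = "mwalamwala" <;> by_cases h4 : x = "sizabwino" <;>
      by_cases h5 : x = "sibho" <;> by_cases h6 : x = "nditrash" <;>
      simp_all <;> omega

-- ===== VERDICT (by name: the statement is the Claim_ definition above) =====
theorem get_polarity_spec : Claim_equal_get_polarity := by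
  intro text _
  unfold Spec_get_polarity get_polarity get_polarity_alt
  set l := PySem.Str.split₀ text with hl
  simp only
  rw [pv_pairfold]
  have hcnt : ∀ w : String, w ∉ pvStopwords → (pvRemLoop l l).count w = l.count w :=
    fun w hw => pv_count_remLoop l l w hw
  rw [hcnt "zabwino" (by decide), hcnt "yabho" (by decide), hcnt "mwalamwala" (by decide),
      hcnt "sizabwino" (by decide), hcnt "sibho" (by decide), hcnt "nditrash" (by decide)]
  simp [pvPositive, pvNegative, PySem.Dict.getD_foldl_insert_add_one, PySem.Dict.getD_empty]
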